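-- pv_equiv track=rewrite | github.com/tansonlee/leetcode | 1930_length_k_palindromic_subsequence/main.py | solve
-- ===== SOURCE A (Python) =====
-- def solve(s, k):
-- 	if k == 0:
-- 		return 1
-- 	if k == 1:
-- 		return len(set(s))
--
-- 	result = 0
-- 	letters = set(s)
-- 	for letter in letters:
-- 		start = s.index(letter)
-- 		end = s.rindex(letter)
-- 		if start < end:
-- 			result += solve(s[start + 1: end], k - 2)
--
-- 	return result
-- ===== SOURCE B (Python) =====
-- def solve(s, k):
--     if k < 0:
--         return 0
--     frontier = [s]
--     for _ in range(k // 2):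
--         if not frontier:
--             return 0
--         nxt = []
--         for sub in frontier:
--             first, last = {}, {}
--             for i, c in enumerate(sub):
--                 if c not in first:
--                     first[c] = i
--                 last[c] = i
--             for c, f in first.items():
--                 l = last[c]
--                 if f < l:
--                     nxt.append(sub[f + 1:l])
--         frontier = nxt
--     if k % 2 == 0:
--         return len(frontier)
--     return sum(len(set(sub)) for sub in frontier)
-- ===== Notes on version B (the rewrite author's own statement) =====
-- stated objective: alternative
-- what changed: B is iterative where A is recursive: it expands a frontier of pending substrings level by level (k//2 layers, each layer built by one first/last-occurrence pass per substring) and then counts the frontier (even k) or sums distinct-letter counts (odd k), instead of A's depth-first recursion with per-letter index/rindex rescans.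
import Mathlib
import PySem

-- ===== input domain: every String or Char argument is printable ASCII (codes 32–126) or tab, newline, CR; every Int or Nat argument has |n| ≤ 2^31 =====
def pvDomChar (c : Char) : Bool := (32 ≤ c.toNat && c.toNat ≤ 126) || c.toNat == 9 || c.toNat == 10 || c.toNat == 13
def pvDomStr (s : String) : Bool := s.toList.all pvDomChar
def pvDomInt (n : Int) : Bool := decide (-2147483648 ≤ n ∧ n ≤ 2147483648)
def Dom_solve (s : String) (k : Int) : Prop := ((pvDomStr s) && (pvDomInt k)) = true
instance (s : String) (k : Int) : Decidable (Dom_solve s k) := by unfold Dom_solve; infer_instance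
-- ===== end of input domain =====

-- B replaces A's depth-first recursion by an iterative level-by-level frontier expansion
-- (k//2 layers of pending substrings, then a final count); objective: alternative.

-- ===== PORT A =====
-- fuel is only a totality guard (every recursive call is on a strictly shorter slice, so
-- fuel = length + 1 is never exhausted); the computation is A's code step for step.
-- s.index(letter) / s.rindex(letter) are ported as PySem.Chars.find / rfind with the one-char
-- substring [letter]; exact here because letter ∈ set(s), so neither ever raises.
def solveGoA : Nat → List Char → Int → Int
  | 0, _, _ => 0
  | fuel+1, cs, k =>
    if k = 0 then 1
    else if k = 1 then PySem.Set.len (PySem.Set.ofList cs)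
    else
      (PySem.Set.ofList cs).foldl (fun result letter =>
        let start := PySem.Chars.find cs [letter]
        let stop  := PySem.Chars.rfind cs [letter]
        if start < stop then
          result + solveGoA fuel (PySem.List.slice cs (some (start + 1)) (some stop)) (k - 2)
        else result) 0

def solve (s : String) (k : Int) : Int := solveGoA (s.toList.length + 1) s.toList k

-- ===== PORT B =====
-- one pass over enumerate(sub) building the (first, last) occurrence dicts
def scanStep (fl : PySem.Dict Char Int × PySem.Dict Char Int) (ic : Int × Char) :
    PySem.Dict Char Int × PySem.Dict Char Int :=
  ((if fl.1.contains ic.2 then fl.1 else fl.1.insert ic.2 ic.1), fl.2.insert ic.2 ic.1)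

def scanFL (cs : List Char) : PySem.Dict Char Int × PySem.Dict Char Int :=
  (PySem.List.enumerate cs 0).foldl scanStep (PySem.Dict.empty, PySem.Dict.empty)

-- the inner 'for sub in frontier: … nxt.append(sub[f+1:l])' body
def pushChildren (nxt : List (List Char)) (sub : List Char) : List (List Char) :=
  let fl := scanFL sub
  fl.1.items.foldl (fun nxt cf =>
    let l := fl.2.getD cf.1 0
    if cf.2 < l then nxt ++ [PySem.List.slice sub (some (cf.2 + 1)) (some l)] else nxt) nxt

def stepFrontier (fr : List (List Char)) : List (List Char) :=
  fr.foldl pushChildren []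

-- 'for _ in range(k // 2): if not frontier: return 0; frontier = nxt' — none = early return 0
def loopB : Nat → List (List Char) → Option (List (List Char))
  | 0, fr => some fr
  | n+1, fr => if fr = [] then none else loopB n (stepFrontier fr)

def solve_alt (s : String) (k : Int) : Int :=
  if k < 0 then 0
  else
    match loopB (k.toNat / 2) [s.toList] with
    | none => 0
    | some fr =>
      if k % 2 = 0 then (fr.length : Int)
      else fr.foldl (fun acc sub => acc + PySem.Set.len (PySem.Set.ofList sub)) 0

-- ===== PRECONDITION & SPEC =====
def Spec_solve (s : String) (k : Int) (out : Int) : Prop := out = solve_alt s k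
instance (s : String) (k : Int) (out : Int) : Decidable (Spec_solve s k out) := by unfold Spec_solve; infer_instance

-- ===== CLAIM (what is proved, stated in full; the proofs are below) =====
def Claim_equal_solve : Prop := ∀ (s : String) (k : Int), Dom_solve s k → Spec_solve s k (solve s k)

-- ===== LEMMAS AND PROOFS =====

theorem singleton_isPrefixOf_drop (s : List Char) (c : Char) (i : Nat) :
    [c].isPrefixOf (s.drop i) = true ↔ s[i]? = some c := by
  rw [List.isPrefixOf_iff_prefix, ← List.head?_drop]
  cases h : s.drop i with
  | nil => simp
  | cons x t => simp [List.cons_prefix_cons, eq_comm]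

theorem findGo_singleton (c : Char) : ∀ (t : List Char) (k : Nat),
    PySem.Chars.find.go [c] t k =
      match PySem.List.index? t c with
      | some i => ((k : Int) + i)
      | none => -1 := by
  intro t
  induction t with
  | nil => intro k; simp [PySem.Chars.find.go, PySem.List.index?]
  | cons x t ih =>
    intro k
    rw [PySem.Chars.find.go]
    by_cases hx : x = c
    · subst hx
      rw [PySem.List.index?_cons_self]
      simp [List.isPrefixOf]
    · rw [PySem.List.index?_cons_of_ne _ (fun h => hx h)]
      have hpre : [c].isPrefixOf (x :: t) = false := by
        simp [List.isPrefixOf]; exact fun h => hx h.symm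
      rw [hpre, ih (k + 1)]
      cases h : PySem.List.index? t c with
      | some i => simp; ring
      | none => simp

theorem find_singleton {cs : List Char} {c : Char} {i : Nat}
    (h : PySem.List.index? cs c = some i) : PySem.Chars.find cs [c] = (i : Int) := by
  rw [PySem.Chars.find, findGo_singleton, h]
  simp

-- index of the LAST occurrence of c in cs (none if absent)
def lastP : List Char → Char → Option Nat
  | [], _ => none
  | x :: t, c =>
    match lastP t c with
    | some i => some (i + 1)
    | none => if x = c then some 0 else none

theorem lastP_eq_none_iff (cs : List Char) (c : Char) : lastP cs c = none ↔ c ∉ cs := by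
  induction cs with
  | nil => simp [lastP]
  | cons x t ih =>
    simp only [lastP, List.mem_cons]
    cases h : lastP t c with
    | some i => simp [h] at ih; simp; tauto
    | none => simp [h] at ih; by_cases hx : x = c <;> simp [hx, ih]; tauto

theorem lastP_append_singleton (xs : List Char) (x c : Char) :
    lastP (xs ++ [x]) c = if x = c then some xs.length else lastP xs c := by
  induction xs with
  | nil => by_cases hx : x = c <;> simp [lastP, hx]
  | cons y t ih =>
    simp only [List.cons_append, lastP, ih]
    by_cases hx : x = c
    · simp [hx]
    · simp [hx]

theorem lastP_take_succ_of_lt (s : List Char) (c : Char) (j : Nat) (h : j < s.length) :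
    lastP (s.take (j + 1)) c = if s[j] = c then some j else lastP (s.take j) c := by
  rw [List.take_add_one, List.getElem?_eq_getElem h]
  simp only [Option.toList]
  rw [lastP_append_singleton]
  by_cases hc : s[j] = c <;> simp [hc, List.length_take, Nat.min_eq_left (Nat.le_of_lt h)]

theorem rfindGo_singleton (s : List Char) (c : Char) : ∀ (j : Nat),
    PySem.Chars.rfind.go s [c] j =
      match lastP (s.take (j + 1)) c with
      | some i => (i : Int)
      | none => -1 := by
  intro j
  induction j with
  | zero =>
    rw [PySem.Chars.rfind.go]
    cases s with
    | nil => simp [List.isPrefixOf, lastP]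
    | cons x t =>
      by_cases hx : x = c
      · subst hx; simp [List.isPrefixOf, lastP]
      · have : [c].isPrefixOf (x :: t) = false := by
          simp [List.isPrefixOf]; exact fun h => hx h.symm
        simp [this, lastP, hx]
  | succ j ih =>
    rw [PySem.Chars.rfind.go, ih]
    by_cases hlt : j + 1 < s.length
    · rw [lastP_take_succ_of_lt s c (j+1) hlt]
      by_cases hc : s[j+1] = c
      · have : [c].isPrefixOf (s.drop (j+1)) = true := by
          rw [singleton_isPrefixOf_drop, List.getElem?_eq_getElem hlt, hc]
        simp [this, hc]
      · have : [c].isPrefixOf (s.drop (j+1)) = false := by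
          rw [Bool.eq_false_iff]
          intro hh
          rw [singleton_isPrefixOf_drop, List.getElem?_eq_getElem hlt] at hh
          exact hc (by simpa using hh)
        simp [this, hc]
    · have hge : s.length ≤ j + 1 := Nat.le_of_not_lt hlt
      have hd : [c].isPrefixOf (s.drop (j+1)) = false := by
        rw [List.drop_eq_nil_of_le hge]; simp [List.isPrefixOf]
      have ht : s.take (j + 1 + 1) = s.take (j + 1) := by
        rw [List.take_of_length_le hge, List.take_of_length_le (by omega)]
      rw [hd, ht]
      simp

theorem rfind_singleton {cs : List Char} {c : Char} {i : Nat}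
    (h : lastP cs c = some i) : PySem.Chars.rfind cs [c] = (i : Int) := by
  rw [PySem.Chars.rfind, rfindGo_singleton, List.take_of_length_le (by omega), h]

theorem scanFL_append (xs : List Char) (x : Char) :
    scanFL (xs ++ [x]) = scanStep (scanFL xs) ((xs.length : Int), x) := by
  unfold scanFL
  rw [PySem.List.enumerate_append, List.foldl_append]
  simp [PySem.List.enumerate_cons, PySem.List.enumerate_nil]

theorem dedup_append_singleton (xs : List Char) (x : Char) :
    PySem.List.dedup (xs ++ [x]) =
      if x ∈ xs then PySem.List.dedup xs else PySem.List.dedup xs ++ [x] := by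
  simp only [PySem.List.dedup_eq_ofList, PySem.Set.ofList_eq_foldl, List.foldl_append,
    List.foldl_cons, List.foldl_nil]
  rw [← PySem.Set.ofList_eq_foldl]
  by_cases hx : x ∈ xs
  · simp [PySem.Set.add, PySem.Set.contains, PySem.Set.mem_ofList, hx]
  · simp [PySem.Set.add, PySem.Set.contains, PySem.Set.mem_ofList, hx]

theorem scan_fst_items (cs : List Char) :
    (scanFL cs).1.items =
      (PySem.List.dedup cs).map (fun c => (c, (((PySem.List.index? cs c).getD 0 : Nat) : Int))) := by
  induction cs using List.reverseRecOn with
  | nil => simp [scanFL, PySem.List.enumerate_nil, PySem.List.dedup, PySem.Dict.empty]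
  | append_singleton xs x ih =>
    rw [scanFL_append, dedup_append_singleton]
    simp only [scanStep]
    have hkeys : (scanFL xs).1.keys = PySem.List.dedup xs := by
      simp only [PySem.Dict.keys, ih, List.map_map]
      simp [Function.comp_def]
    have hmap : ∀ c ∈ PySem.List.dedup xs,
        PySem.List.index? (xs ++ [x]) c = PySem.List.index? xs c := by
      intro c hc
      exact PySem.List.index?_append_of_mem _ ((PySem.List.mem_dedup _ _).1 hc)
    by_cases hx : x ∈ xs
    · have hcont : (scanFL xs).1.contains x = true := by
        rw [PySem.Dict.contains_iff_mem_keys, hkeys, PySem.List.mem_dedup]; exact hx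
      rw [if_pos hcont, if_pos hx, ih]
      exact (List.map_congr_left fun c hc => by rw [hmap c hc]).symm
    · have hcont : (scanFL xs).1.contains x = false := by
        rw [Bool.eq_false_iff]
        intro h
        exact hx ((PySem.List.mem_dedup _ _).1 (hkeys ▸ (PySem.Dict.contains_iff_mem_keys _ _).1 h))
      rw [if_neg (by simp [hcont]), if_neg hx]
      rw [PySem.Dict.items_insert_of_not_contains _ _ hcont, ih, List.map_append]
      congr 1
      · exact List.map_congr_left fun c hc => by rw [hmap c hc]
      · rw [List.map_singleton, PySem.List.index?_append_singleton_self xs x hx]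
        simp

theorem scan_snd_get? (cs : List Char) (c : Char) :
    (scanFL cs).2.get? c = (lastP cs c).map (fun i => ((i : Nat) : Int)) := by
  induction cs using List.reverseRecOn with
  | nil => simp [scanFL, PySem.List.enumerate_nil, lastP, PySem.Dict.empty, PySem.Dict.get?]
  | append_singleton xs x ih =>
    rw [scanFL_append, lastP_append_singleton]
    simp only [scanStep]
    rw [PySem.Dict.get?_insert]
    by_cases hc : c = x
    · simp [hc]
    · rw [if_neg hc, if_neg (fun h => hc h.symm), ih]

-- canonical (fuel-saturated) value of port A
def solveA (cs : List Char) (k : Int) : Int := solveGoA (cs.length + 1) cs k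

def firstIdx (cs : List Char) (c : Char) : Int := (((PySem.List.index? cs c).getD 0 : Nat) : Int)
def lastIdx (cs : List Char) (c : Char) : Int := (((lastP cs c).getD 0 : Nat) : Int)
def childSlice (cs : List Char) (c : Char) : List Char :=
  PySem.List.slice cs (some (firstIdx cs c + 1)) (some (lastIdx cs c))

theorem childSlice_length_lt (cs : List Char) (c : Char) (hc : c ∈ cs) :
    (childSlice cs c).length < cs.length := by
  unfold childSlice firstIdx lastIdx
  have h1 : ((((PySem.List.index? cs c).getD 0 : Nat) : Int) + 1)
      = ((((PySem.List.index? cs c).getD 0 + 1 : Nat)) : Int) := by push_cast; ring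
  rw [h1, PySem.List.slice_natCast]
  have hlen : 0 < cs.length := List.length_pos_of_mem hc
  simp only [List.length_take, List.length_drop]
  omega

theorem foldl_id {α : Type} (L : List α) (a : Int) :
    L.foldl (fun (r : Int) (_ : α) => r) a = a := by
  induction L with
  | nil => rfl
  | cons x t ih => simp [List.foldl_cons]

theorem sum_map_one {α : Type} (L : List α) :
    (L.map (fun (_ : α) => (1 : Int))).sum = (L.length : Int) := by
  induction L with
  | nil => simp
  | cons x t _ => simp; ring

theorem foldl_append_if' {α β : Type} (p : α → Prop) [DecidablePred p] (f : α → β)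
    (L : List α) (acc : List β) :
    L.foldl (fun acc x => if p x then acc ++ [f x] else acc) acc
      = acc ++ (L.filter (fun c => decide (p c))).map f := by
  induction L generalizing acc with
  | nil => simp
  | cons x t ih =>
    by_cases hx : p x
    · simp [List.foldl_cons, hx, ih]
    · simp [List.foldl_cons, hx, ih]

theorem foldl_add_if {α : Type} (p : α → Prop) [DecidablePred p] (g : α → Int)
    (L : List α) (a : Int) :
    L.foldl (fun r c => if p c then r + g c else r) a
      = a + ((L.filter (fun c => decide (p c))).map g).sum := by
  induction L generalizing a with
  | nil => simp
  | cons x t ih =>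
    by_cases hx : p x
    · simp [List.foldl_cons, hx, ih]; ring
    · simp [List.foldl_cons, hx, ih]

-- port A's recursion is fuel-independent once fuel exceeds the string length
theorem solveGoA_fuel_irrel : ∀ (f₁ : Nat) (cs : List Char) (k : Int) (f₂ : Nat),
    cs.length < f₁ → cs.length < f₂ → solveGoA f₁ cs k = solveGoA f₂ cs k := by
  intro f₁
  induction f₁ with
  | zero => intro cs k f₂ h; omega
  | succ m ih =>
    intro cs k f₂ h1 h2
    cases f₂ with
    | zero => omega
    | succ n =>
      rw [solveGoA, solveGoA]
      by_cases hk0 : k = 0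
      · simp [hk0]
      · simp only [if_neg hk0]
        by_cases hk1 : k = 1
        · simp [hk1]
        · simp only [if_neg hk1]
          apply PySem.List.foldl_congr_mem
          intro acc c hc
          have hcs : c ∈ cs := (PySem.Set.mem_ofList cs c).1 hc
          obtain ⟨i, hi⟩ : ∃ i, PySem.List.index? cs c = some i :=
            Option.isSome_iff_exists.1 ((PySem.List.index?_isSome_iff cs c).2 hcs)
          obtain ⟨j, hj⟩ : ∃ j, lastP cs c = some j := by
            cases h : lastP cs c with
            | none => exact absurd hcs ((lastP_eq_none_iff cs c).1 h)
            | some j => exact ⟨j, rfl⟩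
          simp only [find_singleton hi, rfind_singleton hj]
          split_ifs with hlt
          · have hchild : (PySem.List.slice cs (some ((i : Int) + 1)) (some (j : Int))).length
                < cs.length := by
              have := childSlice_length_lt cs c hcs
              unfold childSlice firstIdx lastIdx at this
              rwa [hi, hj] at this
            rw [ih _ _ n (by omega) (by omega)]
          · rfl

theorem solveGoA_neg : ∀ (fuel : Nat) (cs : List Char) (k : Int), k < 0 →
    solveGoA fuel cs k = 0 := by
  intro fuel
  induction fuel with
  | zero => intro cs k _; rfl
  | succ m ih =>
    intro cs k hk
    rw [solveGoA]
    rw [if_neg (by omega), if_neg (by omega)]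
    have : (PySem.Set.ofList cs).foldl (fun result letter =>
        let start := PySem.Chars.find cs [letter]
        let stop  := PySem.Chars.rfind cs [letter]
        if start < stop then
          result + solveGoA m (PySem.List.slice cs (some (start + 1)) (some stop)) (k - 2)
        else result) 0
        = (PySem.Set.ofList cs).foldl (fun (r : Int) (_ : Char) => r) 0 := by
      apply PySem.List.foldl_congr_mem
      intro acc c _
      simp only
      split_ifs
      · rw [ih _ _ (by omega)]; ring
      · rfl
    rw [this, foldl_id]

-- B's child list, in canonical filter/map form
theorem pushChildren_eq (acc : List (List Char)) (cs : List Char) :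
    pushChildren acc cs = acc ++
      ((PySem.List.dedup cs).filter
        (fun c => decide (firstIdx cs c < lastIdx cs c))).map (childSlice cs) := by
  simp only [pushChildren]
  rw [scan_fst_items, List.foldl_map]
  have hbody : ∀ (nxt : List (List Char)) (c : Char), c ∈ PySem.List.dedup cs →
      (let l := (scanFL cs).2.getD c 0;
       if (((PySem.List.index? cs c).getD 0 : Nat) : Int) < l then
         nxt ++ [PySem.List.slice cs (some ((((PySem.List.index? cs c).getD 0 : Nat) : Int) + 1)) (some l)]
       else nxt)
      = if firstIdx cs c < lastIdx cs c then nxt ++ [childSlice cs c] else nxt := by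
    intro nxt c hc
    have hcs : c ∈ cs := (PySem.List.mem_dedup _ _).1 hc
    obtain ⟨j, hj⟩ : ∃ j, lastP cs c = some j := by
      cases h : lastP cs c with
      | none => exact absurd hcs ((lastP_eq_none_iff cs c).1 h)
      | some j => exact ⟨j, rfl⟩
    have hGetD : (scanFL cs).2.getD c 0 = lastIdx cs c := by
      rw [PySem.Dict.getD_eq_get?_getD, scan_snd_get?, hj]
      unfold lastIdx
      rw [hj]
      rfl
    simp only [hGetD]
    rfl
  exact Eq.trans (PySem.List.foldl_congr_mem _ _ _ _ hbody) (foldl_append_if' _ _ _ _)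

-- one unfolding of A, expressed as a sum over B's child list
theorem solveA_unfold (cs : List Char) (k : Int) (hk0 : k ≠ 0) (hk1 : k ≠ 1) :
    solveA cs k = ((pushChildren [] cs).map (fun x => solveA x (k - 2))).sum := by
  unfold solveA
  rw [solveGoA, if_neg hk0, if_neg hk1]
  refine Eq.trans (PySem.List.foldl_congr_mem (PySem.Set.ofList cs) _
    (fun acc c => if firstIdx cs c < lastIdx cs c
      then acc + solveA (childSlice cs c) (k - 2) else acc) 0 ?_) ?_
  · intro acc c hc
    have hcs : c ∈ cs := (PySem.Set.mem_ofList cs c).1 hc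
    obtain ⟨i, hi⟩ : ∃ i, PySem.List.index? cs c = some i :=
      Option.isSome_iff_exists.1 ((PySem.List.index?_isSome_iff cs c).2 hcs)
    obtain ⟨j, hj⟩ : ∃ j, lastP cs c = some j := by
      cases h : lastP cs c with
      | none => exact absurd hcs ((lastP_eq_none_iff cs c).1 h)
      | some j => exact ⟨j, rfl⟩
    have hfi : firstIdx cs c = (i : Int) := by unfold firstIdx; rw [hi]; rfl
    have hli : lastIdx cs c = (j : Int) := by unfold lastIdx; rw [hj]; rfl
    have hsl : childSlice cs c
        = PySem.List.slice cs (some ((i : Int) + 1)) (some (j : Int)) := by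
      unfold childSlice; rw [hfi, hli]
    simp only [find_singleton hi, rfind_singleton hj, hfi, hli, hsl]
    split_ifs with hlt
    · congr 1
      apply solveGoA_fuel_irrel
      · have := childSlice_length_lt cs c hcs
        rw [hsl] at this
        omega
      · omega
    · rfl
  · rw [foldl_add_if, pushChildren_eq]
    simp [PySem.List.dedup_eq_ofList, solveA, Function.comp_def]

theorem stepFrontier_eq (fr : List (List Char)) :
    stepFrontier fr = fr.flatMap (fun sub => pushChildren [] sub) := by
  unfold stepFrontier
  have h : ∀ (acc : List (List Char)) (sub : List Char), sub ∈ fr →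
      pushChildren acc sub = acc ++ pushChildren [] sub := by
    intro acc sub _
    rw [pushChildren_eq, pushChildren_eq, List.nil_append]
  rw [PySem.List.foldl_congr_mem fr pushChildren (fun acc sub => acc ++ pushChildren [] sub) [] h,
    PySem.List.foldl_append_eq_flatMap]
  rfl

theorem sum_map_flatMap {α β : Type} (L : List α) (g : α → List β) (f : β → Int) :
    ((L.flatMap g).map f).sum = (L.map (fun x => ((g x).map f).sum)).sum := by
  induction L with
  | nil => simp
  | cons x t ih => simp [List.flatMap_cons, ih]

-- the frontier invariant: what B's loop tail computes equals the sum of A over the frontier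
theorem loop_inv : ∀ (n : Nat) (fr : List (List Char)) (r : Int), r = 0 ∨ r = 1 →
    (match loopB n fr with
     | none => 0
     | some fr' =>
       if r = 0 then (fr'.length : Int)
       else fr'.foldl (fun acc sub => acc + PySem.Set.len (PySem.Set.ofList sub)) 0)
    = (fr.map (fun x => solveA x (2 * (n : Int) + r))).sum := by
  intro n
  induction n with
  | zero =>
    intro fr r hr
    simp only [loopB]
    rcases hr with hr | hr
    · subst hr
      have : ∀ x ∈ fr, solveA x (2 * ((0 : Nat) : Int) + 0) = 1 := by
        intro x _
        unfold solveA
        rw [solveGoA]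
        norm_num
      rw [List.map_congr_left this, sum_map_one]
      simp
    · subst hr
      rw [if_neg (by norm_num)]
      rw [PySem.List.foldl_add]
      have : ∀ x ∈ fr, solveA x (2 * ((0 : Nat) : Int) + 1)
          = PySem.Set.len (PySem.Set.ofList x) := by
        intro x _
        unfold solveA
        rw [solveGoA]
        norm_num
      rw [List.map_congr_left this]
      ring
  | succ m ih =>
    intro fr r hr
    simp only [loopB]
    by_cases hfr : fr = []
    · subst hfr
      simp
    · rw [if_neg hfr, ih _ r hr, stepFrontier_eq, sum_map_flatMap]
      apply congrArg List.sum
      apply List.map_congr_left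
      intro y _
      push_cast
      rw [solveA_unfold y (2 * ((m : Int) + 1) + r)
          (by rcases hr with h | h <;> omega) (by rcases hr with h | h <;> omega),
        show (2 : Int) * ((m : Int) + 1) + r - 2 = 2 * (m : Int) + r by ring]

-- ===== VERDICT (by name: the statement is the Claim_ definition above) =====
theorem solve_spec : Claim_equal_solve := by
  intro s k _
  unfold Spec_solve solve solve_alt
  by_cases hneg : k < 0
  · rw [if_pos hneg, solveGoA_neg _ _ _ hneg]
  · rw [if_neg hneg]
    have hk : 0 ≤ k := by omega
    have hr : k % 2 = 0 ∨ k % 2 = 1 := by omega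
    have hkey : 2 * ((k.toNat / 2 : Nat) : Int) + k % 2 = k := by omega
    have := loop_inv (k.toNat / 2) [s.toList] (k % 2) hr
    rw [hkey] at this
    rw [this]
    simp [solveA]
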